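-- pv_equiv track=rewrite | github.com/BalakayBishop/Mamdani_Fuzzy_Expert | FuzzyExpert/fuzzy.py | agg_vector
-- ===== SOURCE A (Python) =====
-- def compare(list_item, vector_list, index):
--     y = 0
--     x = 0
--     z = len(vector_list)
--     list_values = []
--     while y < z:
--         if x < 9:
--             a = vector_list[x][index]
--             if a > list_item:
--                 list_values.append(a)
--             else:
--                 list_values.append(list_item)
--             x += 1
--         y += 1
--     value = max(list_values)
--     return value
--
-- def agg_vector(vector_list):
--     temp_list = []
--     for i in vector_list[0]:
--         temp_list.append(i)
--
--     return_list = []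
--     for index, this_item in enumerate(temp_list):
--         value = compare(this_item, vector_list, index)
--         return_list.append(value)
--
--     return return_list
-- ===== SOURCE B (Python) =====
-- def agg_vector(vector_list):
--     result = list(vector_list[0])
--     for row in vector_list[1:9]:
--         result = [max(a, row[i]) for i, a in enumerate(result)]
--     return result
-- ===== Notes on version B (the rewrite author's own statement) =====
-- stated objective: simpler
-- what changed: Replaced the two-function column-major design (for each column, rebuild a per-column list of pairwise maxima over the first <=9 rows and take its max) by a single row-wise running-maximum fold seeded with row 0.
import Mathlib
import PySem

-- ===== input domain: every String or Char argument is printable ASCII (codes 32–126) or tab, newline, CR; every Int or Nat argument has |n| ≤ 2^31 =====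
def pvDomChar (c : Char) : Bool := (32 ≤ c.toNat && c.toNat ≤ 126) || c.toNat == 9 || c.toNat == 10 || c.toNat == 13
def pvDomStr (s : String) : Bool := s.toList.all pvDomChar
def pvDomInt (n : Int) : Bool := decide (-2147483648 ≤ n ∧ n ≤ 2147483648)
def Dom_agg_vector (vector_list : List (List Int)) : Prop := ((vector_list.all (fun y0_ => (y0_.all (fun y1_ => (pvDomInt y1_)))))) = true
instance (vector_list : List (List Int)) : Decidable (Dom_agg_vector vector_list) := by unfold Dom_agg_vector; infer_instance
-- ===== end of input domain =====

-- B replaces A's column-major two-function design by a single row-wise running-maximum fold (objective: simpler).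


-- ===== PORT A =====
-- while loop of `compare`: fuel = remaining y-iterations; state: x and list_values
def compareAux (item : Int) (vl : List (List Int)) (index : Int) : Nat → Nat → List Int → List Int
  | 0, _, acc => acc
  | n+1, x, acc =>
    if x < 9 then
      let a := PySem.List.pyGetD (vl.getD x []) index 0
      compareAux item vl index n (x+1) (acc ++ [if a > item then a else item])
    else
      compareAux item vl index n x acc

def compare_ (item : Int) (vl : List (List Int)) (index : Int) : Int :=
  ((PySem.List.max? (compareAux item vl index vl.length 0 []) (fun y => y)).getD 0)

def agg_vector (vector_list : List (List Int)) : List Int :=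
  let temp_list := (PySem.List.pyGetD vector_list 0 []).foldl (fun acc i => acc ++ [i]) []
  (PySem.List.enumerate temp_list).foldl (fun rl p => rl ++ [compare_ p.2 vector_list p.1]) []

-- ===== PORT B =====
-- one comprehension step of B's loop: pointwise max of the accumulator with a row
def stepB (res row : List Int) : List Int :=
  (PySem.List.enumerate res).map (fun p => max p.2 (PySem.List.pyGetD row p.1 0))

def agg_vector_alt (vector_list : List (List Int)) : List Int :=
  let result := PySem.List.pyGetD vector_list 0 []
  (PySem.List.slice vector_list (some 1) (some 9)).foldl stepB result

-- ===== PRECONDITION & SPEC =====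
-- Pre_ excludes exactly the inputs on which the Python A raises IndexError: the empty list
-- (vector_list[0]) and ragged inputs where one of the first 9 rows is shorter than row 0.
def Pre_agg_vector (vector_list : List (List Int)) : Prop :=
  vector_list ≠ [] ∧ ∀ r ∈ vector_list.take 9, (vector_list.headD []).length ≤ r.length
instance (vector_list : List (List Int)) : Decidable (Pre_agg_vector vector_list) := by
  unfold Pre_agg_vector; infer_instance
def pvWitness_agg_vector : List (List Int) := [[1, 5], [3, 2], [0, 9]]

def Spec_agg_vector (vector_list : List (List Int)) (out : List Int) : Prop := out = agg_vector_alt vector_list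
instance (vector_list : List (List Int)) (out : List Int) : Decidable (Spec_agg_vector vector_list out) := by unfold Spec_agg_vector; infer_instance

-- ===== CLAIM (what is proved, stated in full; the proofs are below) =====
def Claim_equal_agg_vector : Prop := ∀ (vector_list : List (List Int)), Dom_agg_vector vector_list → Pre_agg_vector vector_list → Spec_agg_vector vector_list (agg_vector vector_list)

-- ===== LEMMAS AND PROOFS =====

theorem ite_gt_eq_max (a b : Int) : (if b > a then b else a) = max a b := by
  rw [max_def]; split_ifs <;> omega

theorem compareAux_spec (item : Int) (vl : List (List Int)) (j : Int) :
    ∀ (n x : Nat) (acc : List Int), x + n ≤ vl.length →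
      compareAux item vl j n x acc =
        acc ++ ((vl.drop x).take (min n (9 - x))).map
          (fun r => if PySem.List.pyGetD r j 0 > item then PySem.List.pyGetD r j 0 else item) := by
  intro n
  induction n with
  | zero => intro x acc _; simp [compareAux]
  | succ n ih =>
    intro x acc hx
    by_cases h9 : x < 9
    · have hxlen : x < vl.length := by omega
      have hdrop : vl.drop x = vl[x] :: vl.drop (x + 1) := by
        rw [List.getElem_cons_drop]
      have hmin : min (n + 1) (9 - x) = min n (8 - x) + 1 := by omega
      have hmin2 : 9 - (x + 1) = 8 - x := by omega
      simp only [compareAux, if_pos h9, ih (x + 1) _ (by omega), hdrop, hmin, List.take_succ_cons,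
        List.map_cons, List.getD_eq_getElem vl [] hxlen, hmin2, List.append_assoc,
        List.singleton_append]
    · have hmin : min (n + 1) (9 - x) = min n (9 - x) := by omega
      simp only [compareAux, if_neg h9, ih x acc (by omega), hmin]

theorem foldl_max_absorb (item : Int) (g : List Int → Int) :
    ∀ (l : List (List Int)) (c : Int), item ≤ c →
      l.foldl (fun m r => max m (max item (g r))) c = l.foldl (fun m r => max m (g r)) c := by
  intro l
  induction l with
  | nil => intro c _; rfl
  | cons r t ih =>
    intro c hc
    simp only [List.foldl_cons]
    rw [← max_assoc, max_eq_left hc]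
    exact ih _ (le_trans hc (le_max_left _ _))

theorem compare_eq (item : Int) (h : List Int) (t : List (List Int)) (j : Int)
    (hfh : PySem.List.pyGetD h j 0 = item) :
    compare_ item (h :: t) j
      = (t.take 8).foldl (fun m r => max m (PySem.List.pyGetD r j 0)) item := by
  have hA := compareAux_spec item (h :: t) j (h :: t).length 0 [] (by omega)
  have htake : ((h :: t).drop 0).take (min (h :: t).length (9 - 0)) = h :: t.take 8 := by
    rw [List.drop_zero, Nat.sub_zero, min_comm, ← List.take_take, List.take_length,
      List.take_succ_cons]
  rw [htake] at hA
  unfold compare_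
  rw [hA, List.nil_append, List.map_cons, PySem.List.max?_id_cons, Option.getD_some, hfh]
  simp only [gt_iff_lt, lt_self_iff_false, if_false, List.foldl_map, ite_gt_eq_max]
  exact foldl_max_absorb item _ (t.take 8) item le_rfl

-- B's fold preserves length
theorem length_stepB (res row : List Int) : (stepB res row).length = res.length := by
  simp [stepB, PySem.List.length_enumerate]

theorem length_foldl_stepB : ∀ (rows : List (List Int)) (res : List Int),
    (rows.foldl stepB res).length = res.length := by
  intro rows
  induction rows with
  | nil => intro res; rfl
  | cons row rows ih => intro res; rw [List.foldl_cons, ih, length_stepB]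

theorem getElem_stepB (res row : List Int) (j : Nat) (hj : j < res.length) :
    (stepB res row)[j]'(by rw [length_stepB]; exact hj)
      = max res[j] (PySem.List.pyGetD row (j : Int) 0) := by
  simp [stepB, PySem.List.getElem_enumerate]

theorem foldl_stepB_elem : ∀ (rows : List (List Int)) (res : List Int) (j : Nat)
    (hj : j < res.length),
    (rows.foldl stepB res)[j]?
      = some (rows.foldl (fun m r => max m (PySem.List.pyGetD r (j : Int) 0)) res[j]) := by
  intro rows
  induction rows with
  | nil =>
    intro res j hj
    simp [List.getElem?_eq_getElem hj]
  | cons row rows ih =>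
    intro res j hj
    have hj' : j < (stepB res row).length := by rw [length_stepB]; exact hj
    rw [List.foldl_cons, List.foldl_cons, ih (stepB res row) j hj']
    simp only [getElem_stepB res row j hj]

-- ===== VERDICT (by name: the statement is the Claim_ definition above) =====
theorem agg_vector_A_map (vl : List (List Int)) :
    agg_vector vl = (PySem.List.enumerate (PySem.List.pyGetD vl 0 [])).map
      (fun p => compare_ p.2 vl p.1) := by
  unfold agg_vector
  rw [PySem.List.foldl_append_singleton, List.nil_append,
    PySem.List.foldl_append_singleton_eq_map, List.nil_append]

theorem slice_one_nine (h : List Int) (t : List (List Int)) :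
    PySem.List.slice (h :: t) (some 1) (some 9) = t.take 8 := by
  have : ((1 : Nat) : Int) = (1 : Int) := by norm_num
  have h9 : ((9 : Nat) : Int) = (9 : Int) := by norm_num
  rw [← this, ← h9, PySem.List.slice_natCast]
  rfl

theorem agg_vector_spec : Claim_equal_agg_vector := by
  intro vl _hdom hpre
  unfold Spec_agg_vector
  match vl with
  | [] => exact absurd rfl hpre.1
  | h :: t =>
    apply List.ext_getElem?
    intro j
    rw [agg_vector_A_map]
    unfold agg_vector_alt
    rw [PySem.List.pyGetD_zero_cons, slice_one_nine]
    by_cases hj : j < h.length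
    · rw [foldl_stepB_elem (t.take 8) h j hj]
      rw [List.getElem?_map, PySem.List.getElem?_enumerate, List.getElem?_eq_getElem hj]
      simp only [Option.map_some]
      have hfh : PySem.List.pyGetD h ((0 : Int) + (j : Int)) 0 = h[j] := by
        rw [zero_add, PySem.List.pyGetD_natCast, List.getD_eq_getElem h 0 hj]
      rw [compare_eq h[j] h t _ hfh, zero_add]
    · have h1 : ((PySem.List.enumerate (h :: t).head!).map
          (fun p => compare_ p.2 (h :: t) p.1))[j]? = none := by
        apply List.getElem?_eq_none
        simp [PySem.List.length_enumerate]; omega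
      rw [List.getElem?_eq_none, List.getElem?_eq_none]
      · rw [length_foldl_stepB]; omega
      · simp [PySem.List.length_enumerate]; omega
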